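-- pv_equiv track=rewrite | github.com/Albert-learner/Algorithm | Programmers/LEVEL3/BestOfSet.py | solution
-- ===== SOURCE A (Python) =====
-- def solution(n, s):
--     if n > s: return [-1]
--
--     answer = []
--     # s를 n으로 나눈 몫이 n개가 되도록 초기값 설정
--     initial = s // n
--     for _ in range(n):
--         answer.append(initial)
--     idx = -1
--     for _ in range(s % n):
--         answer[idx] += 1
--         idx -= 1
--
--     return answer
-- ===== SOURCE B (Python) =====
-- def solution(n, s):
--     if n > s: return [-1]
--     answer = []
--     remaining = s
--     for i in range(n, 0, -1):
--         k = remaining // i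
--         answer.append(k)
--         remaining -= k
--     return answer
-- ===== Notes on version B (the rewrite author's own statement) =====
-- stated objective: alternative
-- what changed: Replaces A's fill-then-patch scheme (n copies of s//n, then a backwards pass incrementing the last s%n entries) with a single greedy pass that appends remaining//i for i counting down from n and subtracts it from the remaining sum.
import Mathlib
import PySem

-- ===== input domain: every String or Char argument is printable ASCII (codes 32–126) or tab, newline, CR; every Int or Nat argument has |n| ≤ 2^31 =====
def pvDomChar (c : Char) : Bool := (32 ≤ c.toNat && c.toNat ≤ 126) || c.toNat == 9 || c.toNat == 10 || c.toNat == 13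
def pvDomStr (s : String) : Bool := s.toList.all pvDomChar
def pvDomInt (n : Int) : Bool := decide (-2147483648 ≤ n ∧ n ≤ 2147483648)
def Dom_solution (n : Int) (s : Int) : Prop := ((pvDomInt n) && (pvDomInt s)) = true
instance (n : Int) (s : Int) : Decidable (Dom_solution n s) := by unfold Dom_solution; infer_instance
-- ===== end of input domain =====

-- B replaces A's fill-then-patch scheme (n copies of s//n, then a backwards pass
-- incrementing the last s%n entries) by a single greedy pass that gives each of the
-- remaining i parts the floor of the remaining sum; objective: alternative (one pass,
-- no post-correction).

-- ===== PORT A =====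
-- literal transliteration of A: guard, append loop, then the decrement-index increment loop
-- (answer[idx] += 1 is ported as pySetD/pyGetD — exact Python negative-index semantics).
def solution (n : Int) (s : Int) : List Int :=
  if n > s then [-1]
  else
    let initial := PySem.Int.floordiv s n
    let answer := (PySem.List.pyRange 0 n 1).foldl (fun acc _ => acc ++ [initial]) []
    let st := (PySem.List.pyRange 0 (PySem.Int.mod s n) 1).foldl
      (fun (st : List Int × Int) _ =>
        (PySem.List.pySetD st.1 st.2 (PySem.List.pyGetD st.1 st.2 0 + 1), st.2 - 1))
      (answer, -1)
    st.1

-- ===== PORT B =====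
-- literal transliteration of B: a countdown loop over range(n, 0, -1) carrying
-- (answer, remaining); each step appends remaining // i and subtracts it.
def solution_alt (n : Int) (s : Int) : List Int :=
  if n > s then [-1]
  else
    let st := (PySem.List.pyRange n 0 (-1)).foldl
      (fun (st : List Int × Int) i =>
        let k := PySem.Int.floordiv st.2 i
        (st.1 ++ [k], st.2 - k))
      ([], s)
    st.1

-- ===== PRECONDITION & SPEC =====
-- Pre_ excludes only n = 0 with n ≤ s, where A raises ZeroDivisionError at s // n.
def Pre_solution (n : Int) (s : Int) : Prop := n > s ∨ n ≠ 0
instance (n : Int) (s : Int) : Decidable (Pre_solution n s) := by unfold Pre_solution; infer_instance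
def pvWitness_solution : Int × Int := (3, 11)

def Spec_solution (n : Int) (s : Int) (out : List Int) : Prop := out = solution_alt n s
instance (n : Int) (s : Int) (out : List Int) : Decidable (Spec_solution n s out) := by unfold Spec_solution; infer_instance

-- ===== CLAIM (what is proved, stated in full; the proofs are below) =====
def Claim_equal_solution : Prop := ∀ (n : Int) (s : Int), Dom_solution n s → Pre_solution n s → Spec_solution n s (solution n s)

-- ===== LEMMAS AND PROOFS =====

-- the common closed form both programs reach: m parts of rem, the smaller parts first
def pvSplit (m : Nat) (rem : Int) : List Int :=
  match m with
  | 0 => []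
  | Nat.succ k =>
    List.replicate (((k:Int) + 1 - rem % ((k:Int) + 1)).toNat) (rem / ((k:Int) + 1))
    ++ List.replicate ((rem % ((k:Int) + 1)).toNat) (rem / ((k:Int) + 1) + 1)

-- peeling one greedy step off the closed form
theorem pvSplit_succ (m : Nat) (rem : Int) :
    pvSplit (m + 1) rem = rem / ((m:Int) + 1) :: pvSplit m (rem - rem / ((m:Int) + 1)) := by
  cases m with
  | zero =>
    simp only [pvSplit, Nat.cast_zero, zero_add]
    simp
  | succ k =>
    simp only [pvSplit]
    push_cast
    set j : Int := (k:Int) + 1 with hj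
    set q := rem / (j + 1) with hq
    set r := rem % (j + 1) with hr
    have hjpos : 0 < j := by omega
    have hr0 : 0 ≤ r := Int.emod_nonneg rem (by omega)
    have hri : r < j + 1 := Int.emod_lt_of_pos rem (by omega)
    have hrem : rem = (j + 1) * q + r := by
      rw [hq, hr]; exact (Int.mul_ediv_add_emod rem (j+1)).symm
    have hlin : (j + 1) * q = q * j + q := by ring
    have hrem' : rem - q = q * j + r := by omega
    have hdiv : ∀ p a : Int, 0 ≤ a → a < j → (p * j + a) / j = p := by
      intro p a h1 h2
      rw [show p * j + a = a + j * p by ring, Int.add_mul_ediv_left a p (by omega : j ≠ 0),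
        Int.ediv_eq_zero_of_lt h1 h2, zero_add]
    have hmod : ∀ p a : Int, 0 ≤ a → a < j → (p * j + a) % j = a := by
      intro p a h1 h2
      rw [show p * j + a = a + j * p by ring, Int.add_mul_emod_self_left, Int.emod_eq_of_lt h1 h2]
    by_cases hcase : r < j
    · -- remainder untouched: quotient stays q
      have h1 : (rem - q) / j = q := by rw [hrem']; exact hdiv q r hr0 hcase
      have h2 : (rem - q) % j = r := by rw [hrem']; exact hmod q r hr0 hcase
      rw [h1, h2]
      have hcount : (j + 1 - r).toNat = (j - r).toNat + 1 := by omega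
      rw [hcount, List.replicate_succ]
      simp
    · -- r = j: the new sum is exactly divisible, quotient becomes q+1
      have hrj : r = j := by omega
      have h1 : (rem - q) / j = q + 1 := by
        rw [hrem', hrj, show q * j + j = (q+1) * j + 0 by ring]; exact hdiv (q+1) 0 le_rfl hjpos
      have h2 : (rem - q) % j = 0 := by
        rw [hrem', hrj, show q * j + j = (q+1) * j + 0 by ring]; exact hmod (q+1) 0 le_rfl hjpos
      rw [h1, h2]
      have hc1 : (j + 1 - r).toNat = 1 := by omega
      have hc2 : r.toNat = (j - (0:Int)).toNat := by omega
      rw [hc1, hc2]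
      simp

-- B's loop computes the closed form
theorem B_loop_eq_pvSplit : ∀ (m : Nat) (rem : Int) (acc : List Int),
    ((PySem.List.pyRange (m:Int) 0 (-1)).foldl
      (fun (st : List Int × Int) i =>
        (st.1 ++ [PySem.Int.floordiv st.2 i], st.2 - PySem.Int.floordiv st.2 i))
      (acc, rem)).1 = acc ++ pvSplit m rem := by
  intro m
  induction m with
  | zero =>
    intro rem acc
    rw [PySem.List.pyRange_neg_one_eq_nil (by omega)]
    simp [pvSplit]
  | succ k ih =>
    intro rem acc
    rw [PySem.List.pyRange_neg_one_cons (by push_cast; omega), List.foldl_cons]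
    have hfd : PySem.Int.floordiv rem ((Nat.succ k : Nat) : Int) = rem / (((k:Nat) : Int) + 1) := by
      rw [PySem.Int.floordiv_eq_ediv_of_pos (by push_cast; omega)]
      push_cast
      ring_nf
    simp only [hfd]
    rw [show (((Nat.succ k : Nat) : Int)) - 1 = ((k:Nat) : Int) by push_cast; ring]
    rw [ih (rem - rem / (((k:Nat) : Int) + 1)) (acc ++ [rem / (((k:Nat) : Int) + 1)])]
    rw [pvSplit_succ, List.append_assoc]
    rfl

-- A's first loop builds n copies of initial.
theorem append_loop_eq_replicate (c : Int) : ∀ (l : List Int) (acc : List Int),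
    l.foldl (fun a (_ : Int) => a ++ [c]) acc = acc ++ List.replicate l.length c := by
  intro l
  induction l with
  | nil => simp
  | cons x xs ih =>
    intro acc
    rw [List.foldl_cons, ih, List.append_assoc]
    congr 1

-- one step of A's second loop on the invariant state
theorem step_eq (q : Int) (a b : Nat) (ha : 1 ≤ a) :
    (PySem.List.pySetD (List.replicate a q ++ List.replicate b (q+1)) (-1 - (b:Int))
       (PySem.List.pyGetD (List.replicate a q ++ List.replicate b (q+1)) (-1 - (b:Int)) 0 + 1))
    = List.replicate (a-1) q ++ List.replicate (b+1) (q+1) := by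
  have hlen : (List.replicate a q ++ List.replicate b (q+1)).length = a + b := by simp
  have hidx : PySem.List.pyIdx? (a + b) (-1 - (b:Int)) = some (a - 1) := by
    unfold PySem.List.pyIdx?
    rw [if_neg (by omega), if_pos (by push_cast; omega)]
    congr 1
    omega
  have hget : (List.replicate a q ++ List.replicate b (q+1))[a-1]? = some q := by
    rw [List.getElem?_append_left (by simp; omega)]
    have hlt : a - 1 < (List.replicate a q).length := by simp; omega
    rw [List.getElem?_eq_getElem hlt]
    simp
  have hgetD : PySem.List.pyGetD (List.replicate a q ++ List.replicate b (q+1)) (-1 - (b:Int)) 0 = q := by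
    unfold PySem.List.pyGetD PySem.List.pyGet?
    rw [hlen, hidx]
    simp [hget]
  rw [hgetD]
  unfold PySem.List.pySetD PySem.List.pySet?
  rw [hlen, hidx]
  simp only [Option.map_some, Option.getD_some]
  have hset : (List.replicate a q ++ List.replicate b (q+1)).set (a-1) (q+1)
      = List.replicate (a-1) q ++ List.replicate (b+1) (q+1) := by
    rw [List.set_append_left _ _ (by simp; omega)]
    have : (List.replicate a q).set (a-1) (q+1)
        = List.replicate (a-1) q ++ [q+1] := by
      have ha' : a = (a-1) + 1 := by omega
      rw [ha', List.replicate_succ']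
      simp [List.set_append_right, List.length_replicate]
    rw [this, List.append_assoc]
    congr 1
  rw [hset]

-- A's second loop: after k steps the last (b+k) entries have been incremented.
theorem loop2_eq (q : Int) : ∀ (l : List Int) (a b : Nat), l.length ≤ a →
    (l.foldl
      (fun (st : List Int × Int) (_ : Int) =>
        (PySem.List.pySetD st.1 st.2 (PySem.List.pyGetD st.1 st.2 0 + 1), st.2 - 1))
      (List.replicate a q ++ List.replicate b (q+1), -1 - (b:Int))).1
    = List.replicate (a - l.length) q ++ List.replicate (b + l.length) (q+1) := by
  intro l
  induction l with
  | nil => intro a b _; simp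
  | cons x xs ih =>
    intro a b h
    simp only [List.foldl_cons, List.length_cons] at *
    rw [step_eq q a b (by omega)]
    have : (-1 - (b:Int)) - 1 = -1 - ((b+1 : Nat) : Int) := by push_cast; ring
    rw [this, ih (a-1) (b+1) (by omega)]
    congr 2 <;> omega

-- ===== VERDICT (by name: the statement is the Claim_ definition above) =====
theorem solution_spec : Claim_equal_solution := by
  intro n s _ hpre
  unfold Spec_solution solution solution_alt
  by_cases hns : n > s
  · simp [hns]
  · simp only [hns, if_false]
    have hn : n ≠ 0 := by rcases hpre with h | h; omega; exact h
    by_cases hpos : 0 < n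
    · -- positive n : 0 ≤ r < n
      have hr0 : 0 ≤ PySem.Int.mod s n := by
        rw [PySem.Int.mod_eq_emod_of_pos hpos]; exact Int.emod_nonneg s (by omega)
      have hrn : PySem.Int.mod s n < n := by
        rw [PySem.Int.mod_eq_emod_of_pos hpos]; exact Int.emod_lt_of_pos s hpos
      set r := PySem.Int.mod s n with hr
      set q := PySem.Int.floordiv s n with hq
      have h1 : (PySem.List.pyRange 0 n 1).foldl (fun a (_ : Int) => a ++ [q]) []
          = List.replicate n.toNat q := by
        rw [append_loop_eq_replicate q]
        simp [PySem.List.length_pyRange_one]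
      simp only [h1]
      have h2 := loop2_eq q (PySem.List.pyRange 0 r 1) n.toNat 0 (by
        rw [PySem.List.length_pyRange_one]; omega)
      simp only [List.replicate_zero, List.append_nil, Nat.cast_zero, Int.sub_zero,
        Nat.zero_add, PySem.List.length_pyRange_one] at h2
      rw [h2]
      -- B's side: the greedy loop computes pvSplit n.toNat s
      obtain ⟨k, hk⟩ : ∃ k : Nat, n.toNat = k + 1 := ⟨n.toNat - 1, by omega⟩
      have hncast : ((n.toNat : Nat) : Int) = n := by omega
      have hB := B_loop_eq_pvSplit n.toNat s []
      rw [hncast] at hB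
      rw [hB, List.nil_append, hk]
      simp only [pvSplit]
      have hki : (k:Int) + 1 = n := by omega
      rw [hki]
      have hqd : q = s / n := by rw [hq]; exact PySem.Int.floordiv_eq_ediv_of_pos hpos
      have hrd : r = s % n := by rw [hr]; exact PySem.Int.mod_eq_emod_of_pos hpos
      rw [← hqd, ← hrd]
      congr 2 <;> omega
    · -- negative n ≤ s : all three loops are empty and both sides are []
      have hneg : n < 0 := by omega
      have hmm := PySem.Int.mod_neg_neg s n
      have hlo : 0 ≤ PySem.Int.mod (-s) (-n) := by
        rw [PySem.Int.mod_eq_emod_of_pos (by omega)]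
        exact Int.emod_nonneg _ (by omega)
      have hhi : PySem.Int.mod (-s) (-n) < -n := by
        rw [PySem.Int.mod_eq_emod_of_pos (by omega)]
        exact Int.emod_lt_of_pos _ (by omega)
      rw [PySem.List.pyRange_one_eq_nil (by omega), PySem.List.pyRange_one_eq_nil (by omega),
        PySem.List.pyRange_neg_one_eq_nil (by omega)]
      simp
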